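-- pv_equiv track=rewrite | github.com/ZhivkoMarinov/Python-101 | C01-Basics/C01P16_Nokia_keypad.py | convert_to_message
-- ===== SOURCE A (Python) =====
-- phone_keys = {
--         0: " ",
--         1: '1',
--         2: ["a", "b", "c"],
--         3: ["d", "e", "f"],
--         4: ["g", "h", "i"],
--         5: ["j", "k", "l"],
--         6: ["m", "n", "o"],
--         7: ["p", "q", "r", "s"],
--         8: ["t", "u", "v"],
--         9: ["w", "x", "y", "z"]
--     }
--
-- def convert_to_message(number):
--
--     message_ready = []
--
--     for index in number:
--         key = index[0]
--         letter = len(index)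
--         counter = 0
--
--         if letter > len(phone_keys[key]):
--
--             for i in range(letter):
--                 counter += 1
--
--                 if counter > len(phone_keys[key]):
--                     counter = 1
--
--                 letter = counter
--
--         message_ready.append(phone_keys[key][letter - 1])
--
--     for i, v in enumerate(message_ready):
--         if v == '1':
--             message_ready[i + 1] = message_ready[i + 1].upper()
--             message_ready.pop(i)
--
--     return ''.join(message_ready)
-- ===== SOURCE B (Python) =====
-- phone_keys = {
--         0: " ",
--         1: '1',
--         2: ["a", "b", "c"],
--         3: ["d", "e", "f"],
--         4: ["g", "h", "i"],
--         5: ["j", "k", "l"],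
--         6: ["m", "n", "o"],
--         7: ["p", "q", "r", "s"],
--         8: ["t", "u", "v"],
--         9: ["w", "x", "y", "z"]
--     }
--
-- def convert_to_message(number):
--     # one pass: each group decodes in closed form via (len-1) % keylen; a decoded
--     # '1' just sets a flag that uppercases the next decoded character.
--     out = []
--     pending = False
--     for g in number:
--         keys = phone_keys[g[0]]
--         ch = keys[(len(g) - 1) % len(keys)]
--         if pending:
--             out.append(ch.upper())
--             pending = False
--         elif ch == '1':
--             pending = True
--         else:
--             out.append(ch)
--     return ''.join(out)
-- ===== Notes on version B (the rewrite author's own statement) =====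
-- stated objective: simpler
-- what changed: B is a single pass carrying an uppercase-next flag: each group's character is computed in closed form as phone_keys[key][(len(group)-1) % keylen] (no wrapping counter loop), and a decoded '1' just flags the next character for uppercasing, replacing A's second mutate-while-enumerating pop pass entirely.
import Mathlib
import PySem

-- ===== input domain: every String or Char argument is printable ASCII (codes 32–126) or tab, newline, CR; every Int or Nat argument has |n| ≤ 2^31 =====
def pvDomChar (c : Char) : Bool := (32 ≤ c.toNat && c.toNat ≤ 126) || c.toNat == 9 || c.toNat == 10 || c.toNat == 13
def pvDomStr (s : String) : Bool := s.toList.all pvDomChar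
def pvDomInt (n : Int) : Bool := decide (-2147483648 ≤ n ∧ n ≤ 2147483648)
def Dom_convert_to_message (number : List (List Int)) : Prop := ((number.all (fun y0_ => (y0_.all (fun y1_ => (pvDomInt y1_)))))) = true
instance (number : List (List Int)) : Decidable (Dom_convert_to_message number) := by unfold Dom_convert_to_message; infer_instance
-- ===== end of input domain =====

-- B replaces A's two staged passes (decode every group with a wrapping counter loop, then
-- fix up '1's by mutating-while-enumerating) with one pass that decodes each group in
-- closed form ((len-1) mod keylen) and carries an uppercase-next flag; neither Python
-- mutates its argument.

-- phone_keys: dict literal of the module (strings " "/"1" and letter lists, as List Char)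
def phoneKeys (k : Int) : List Char :=
  if k = 0 then [' ']
  else if k = 1 then ['1']
  else if k = 2 then ['a','b','c']
  else if k = 3 then ['d','e','f']
  else if k = 4 then ['g','h','i']
  else if k = 5 then ['j','k','l']
  else if k = 6 then ['m','n','o']
  else if k = 7 then ['p','q','r','s']
  else if k = 8 then ['t','u','v']
  else if k = 9 then ['w','x','y','z']
  else []   -- KeyError in Python; excluded by Pre_

-- ===== PORT A =====
-- inner loop: `for i in range(letter): counter += 1; if counter > keylen: counter = 1; letter = counter`
def aStep (keylen : Nat) (st : Nat × Nat) (_ : Nat) : Nat × Nat :=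
  let counter := st.1 + 1
  let counter := if counter > keylen then 1 else counter
  (counter, counter)

def aInner (keylen letter : Nat) : Nat :=
  ((List.range letter).foldl (aStep keylen) (0, letter)).2

-- the body of A's first for-loop, producing the appended character
def aDecode (g : List Int) : Char :=
  let keys := phoneKeys g.headI        -- key = index[0] (IndexError on [] excluded by Pre_)
  let letter := g.length
  let letter := if letter > keys.length then aInner keys.length letter else letter
  keys.getD (letter - 1) ' '           -- phone_keys[key][letter - 1], in range under Pre_

-- A's second pass: `for i, v in enumerate(message_ready): …pop(i)` — the iterator index
-- advances every step and stops when it reaches the current length. Out-of-range set/get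
-- (Python IndexError) excluded by Pre_.
def shiftOnes (i : Nat) (lst : List Char) : List Char :=
  if i < lst.length then
    if lst.getD i ' ' = '1' then
      shiftOnes (i+1) ((lst.set (i+1) ((lst.getD (i+1) ' ').toUpper)).eraseIdx i)
    else shiftOnes (i+1) lst
  else lst
termination_by lst.length - i
decreasing_by
  · simp_all [List.length_eraseIdx]; omega
  · omega

def convert_to_message (number : List (List Int)) : String :=
  String.ofList (shiftOnes 0 (number.map aDecode))

-- ===== PORT B =====
-- B's single loop body: state = (out, pending-uppercase flag)
def bStep (st : List Char × Bool) (g : List Int) : List Char × Bool :=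
  let keys := phoneKeys g.headI
  let ch := keys.getD ((g.length - 1) % keys.length) ' '
  if st.2 then (st.1 ++ [ch.toUpper], false)
  else if ch = '1' then (st.1, true)
  else (st.1 ++ [ch], false)

def convert_to_message_alt (number : List (List Int)) : String :=
  String.ofList (number.foldl bStep ([], false)).1

-- ===== PRECONDITION & SPEC =====
-- Pre_ excludes exactly the inputs where Python A raises: an empty group (IndexError on
-- index[0]), a first element outside 0..9 (KeyError), and an odd-length trailing run of
-- key-1 groups, on which A's '1'-shift loop reads past the end (IndexError).
def Pre_convert_to_message (number : List (List Int)) : Prop :=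
  (∀ g ∈ number, g ≠ [] ∧ 0 ≤ g.headI ∧ g.headI ≤ 9) ∧
  (number.reverse.takeWhile (fun g => g.headI == 1)).length % 2 = 0
instance (number : List (List Int)) : Decidable (Pre_convert_to_message number) := by unfold Pre_convert_to_message; infer_instance

def pvWitness_convert_to_message : List (List Int) := [[4,4], [3,3], [5,5,5], [5,5,5], [6,6,6], [0], [1], [9], [6,6,6], [7,7,7], [5,5,5], [3,3], [2,2,2,2,2]]

def Spec_convert_to_message (number : List (List Int)) (out : String) : Prop := out = convert_to_message_alt number
instance (number : List (List Int)) (out : String) : Decidable (Spec_convert_to_message number out) := by unfold Spec_convert_to_message; infer_instance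

-- ===== CLAIM (what is proved, stated in full; the proofs are below) =====
def Claim_equal_convert_to_message : Prop := ∀ (number : List (List Int)), Dom_convert_to_message number → Pre_convert_to_message number → Spec_convert_to_message number (convert_to_message number)

-- ===== LEMMAS AND PROOFS =====

-- after n ≥ 1 iterations the counter is (n-1) % k + 1
lemma aInner_counter (k : Nat) (hk : 1 ≤ k) (L : Nat) :
    ∀ n, 1 ≤ n → (List.range n).foldl (aStep k) (0, L) = ((n-1) % k + 1, (n-1) % k + 1) := by
  intro n hn
  induction n with
  | zero => omega
  | succ m ih =>
    rcases Nat.eq_zero_or_pos m with hm | hm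
    · subst hm
      simp [List.range_succ, aStep]
    · rw [List.range_succ, List.foldl_append, ih hm]
      simp only [List.foldl, aStep]
      have hr : (m - 1) % k < k := Nat.mod_lt _ hk
      have hmod : m % k = ((m - 1) % k + 1 % k) % k := by
        conv_lhs => rw [show m = (m-1)+1 by omega, Nat.add_mod]
      rcases Nat.lt_or_ge ((m-1) % k + 1) k with hlt | hge
      · have hk2 : 1 < k := by omega
        have h1 : m % k = (m-1) % k + 1 := by
          rw [hmod, Nat.mod_eq_of_lt hk2, Nat.mod_eq_of_lt hlt]
        have h2 : ¬ ((m-1) % k + 1 + 1 > k) := by omega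
        simp [h1, h2]
      · have h0 : m % k = 0 := by
          rcases Nat.eq_or_lt_of_le hk with e | e
          · rw [hmod, ← e]
            simp [Nat.mod_one]
          · rw [hmod, Nat.mod_eq_of_lt e, show (m-1) % k + 1 = k by omega, Nat.mod_self]
        have h2 : (m-1) % k + 1 + 1 > k := by omega
        simp [h0, h2]

lemma phoneKeys_len (h : Int) (h0 : 0 ≤ h) (h9 : h ≤ 9) : 1 ≤ (phoneKeys h).length := by
  interval_cases h <;> simp [phoneKeys]

-- B's closed-form character for one group
def bDecode (g : List Int) : Char :=
  let keys := phoneKeys g.headI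
  keys.getD ((g.length - 1) % keys.length) ' '

lemma decode_eq (g : List Int) (hne : g ≠ []) (h0 : 0 ≤ g.headI) (h9 : g.headI ≤ 9) :
    aDecode g = bDecode g := by
  unfold aDecode bDecode
  set keys := phoneKeys g.headI with hkeys
  have hk : 1 ≤ keys.length := phoneKeys_len _ h0 h9
  have hL : 1 ≤ g.length := by cases g <;> simp_all
  by_cases hgt : g.length > keys.length
  · have heq : aInner keys.length g.length = (g.length - 1) % keys.length + 1 := by
      unfold aInner
      rw [aInner_counter _ hk _ _ hL]
    simp [hgt, heq]
  · simp only [hgt, if_false]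
    congr 1
    rw [Nat.mod_eq_of_lt (by omega)]

-- the common specification of the '1'-shift: consume '1'-pairs left to right
def pairUp : List Char → List Char
  | [] => []
  | [c] => if c = '1' then [] else [c]
  | c :: d :: rest => if c = '1' then d.toUpper :: pairUp rest else c :: pairUp (d :: rest)

lemma set_mid (pre : List Char) (c : Char) (t : List Char) (x : Char) :
    (pre ++ c :: t).set pre.length x = pre ++ x :: t := by
  induction pre with
  | nil => simp
  | cons a pre ih => simp [ih]

lemma erase_mid (pre : List Char) (c : Char) (t : List Char) :
    (pre ++ c :: t).eraseIdx pre.length = pre ++ t := by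
  induction pre with
  | nil => simp
  | cons a pre ih => simp [ih]

-- A's mutate-while-enumerating pass computes pairUp beyond the scanned prefix
lemma shiftOnes_append (rest : List Char) : ∀ pre : List Char,
    shiftOnes pre.length (pre ++ rest) = pre ++ pairUp rest := by
  induction rest using pairUp.induct with
  | case1 =>
    intro pre
    rw [shiftOnes]
    simp [pairUp]
  | case2 =>
    intro pre
    rw [shiftOnes, pairUp]
    have hget : (pre ++ ['1']).getD pre.length ' ' = '1' := by
      simp
    have hset : (pre ++ ['1']).set (pre.length + 1) (((pre ++ ['1']).getD (pre.length + 1) ' ').toUpper) = pre ++ ['1'] := by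
      apply List.set_eq_of_length_le
      simp
    rw [if_pos (by simp), hget, if_pos rfl, hset]
    rw [show (pre ++ ['1']).eraseIdx pre.length = pre ++ [] from erase_mid pre '1' []]
    rw [shiftOnes]
    simp
  | case3 c h =>
    intro pre
    rw [shiftOnes, pairUp]
    rw [if_pos (by simp), if_neg (by simpa using h), if_neg h]
    have : pre ++ [c] = pre ++ [c] := rfl
    calc shiftOnes (pre.length + 1) (pre ++ [c])
        = shiftOnes (pre ++ [c]).length ((pre ++ [c]) ++ []) := by simp
      _ = (pre ++ [c]) ++ pairUp [] := by
            rw [shiftOnes, if_neg (by simp)]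
            simp [pairUp]
      _ = pre ++ [c] := by simp [pairUp]
  | case4 d rest ih =>
    intro pre
    rw [shiftOnes, pairUp, if_pos rfl]
    have hget : (pre ++ '1' :: d :: rest).getD pre.length ' ' = '1' := by
      simp
    have hget2 : (pre ++ '1' :: d :: rest).getD (pre.length + 1) ' ' = d := by
      rw [List.getD_append_right _ _ _ _ (by omega)]
      simp
    rw [if_pos (by simp), hget, if_pos rfl, hget2]
    have hset : (pre ++ '1' :: d :: rest).set (pre.length + 1) d.toUpper
        = pre ++ '1' :: d.toUpper :: rest := by
      rw [show pre ++ '1' :: d :: rest = (pre ++ ['1']) ++ d :: rest by simp,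
          show pre.length + 1 = (pre ++ ['1']).length by simp]
      rw [set_mid (pre ++ ['1']) d rest d.toUpper]
      simp
    rw [hset]
    rw [erase_mid pre '1' (d.toUpper :: rest), show pre ++ d.toUpper :: rest = (pre ++ [d.toUpper]) ++ rest by simp,
        show pre.length + 1 = (pre ++ [d.toUpper]).length by simp]
    rw [ih (pre ++ [d.toUpper])]
    simp
  | case5 c d rest h ih =>
    intro pre
    rw [shiftOnes, pairUp, if_neg h]
    rw [if_pos (by simp), if_neg (by simpa using h)]
    rw [show pre ++ c :: d :: rest = (pre ++ [c]) ++ d :: rest by simp,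
        show pre.length + 1 = (pre ++ [c]).length by simp]
    rw [ih (pre ++ [c])]
    simp

-- B's flag-carrying fold, restated on the decoded characters
def chStep (st : List Char × Bool) (ch : Char) : List Char × Bool :=
  if st.2 then (st.1 ++ [ch.toUpper], false)
  else if ch = '1' then (st.1, true)
  else (st.1 ++ [ch], false)

lemma bStep_eq (st : List Char × Bool) (g : List Int) : bStep st g = chStep st (bDecode g) := rfl

lemma foldl_chStep (cs : List Char) : ∀ acc : List Char,
    (cs.foldl chStep (acc, false)).1 = acc ++ pairUp cs := by
  induction cs using pairUp.induct with
  | case1 => intro acc; simp [pairUp]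
  | case2 =>
    intro acc
    simp [pairUp, chStep]
  | case3 c h =>
    intro acc
    simp [pairUp, chStep, h]
  | case4 d rest ih =>
    intro acc
    show ((d :: rest).foldl chStep (chStep (acc, false) '1')).1 = _
    rw [show chStep (acc, false) '1' = (acc, true) by simp [chStep]]
    show (rest.foldl chStep (chStep (acc, true) d)).1 = _
    rw [show chStep (acc, true) d = (acc ++ [d.toUpper], false) by simp [chStep]]
    rw [ih (acc ++ [d.toUpper]), pairUp, if_pos rfl]
    simp
  | case5 c d rest h ih =>
    intro acc
    show ((d :: rest).foldl chStep (chStep (acc, false) c)).1 = _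
    rw [show chStep (acc, false) c = (acc ++ [c], false) by simp [chStep, h]]
    rw [ih (acc ++ [c]), pairUp, if_neg h]
    simp

-- ===== VERDICT (by name: the statement is the Claim_ definition above) =====
theorem convert_to_message_spec : Claim_equal_convert_to_message := by
  intro number _ hpre
  unfold Spec_convert_to_message convert_to_message convert_to_message_alt
  have hmap : number.map aDecode = number.map bDecode := by
    apply List.map_congr_left
    intro g hg
    obtain ⟨h1, h2, h3⟩ := hpre.1 g hg
    exact decode_eq g h1 h2 h3
  have hA : shiftOnes 0 (number.map aDecode) = pairUp (number.map bDecode) := by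
    rw [hmap]
    simpa using shiftOnes_append (number.map bDecode) []
  have hB : (number.foldl bStep ([], false)).1 = pairUp (number.map bDecode) := by
    have key : ∀ (l : List (List Int)) (st : List Char × Bool),
        l.foldl bStep st = (l.map bDecode).foldl chStep st := by
      intro l
      induction l with
      | nil => intro st; rfl
      | cons g t ih => intro st; simp only [List.foldl_cons, List.map_cons, bStep_eq, ih]
    rw [key]
    simpa using foldl_chStep (number.map bDecode) []
  rw [hA, hB]
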